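-- pv_equiv track=rewrite | github.com/anandhu-co-in/python_CodingMastery | 01.CodingMasterty/0019.Count of ways to make Array sum even by removing only one element.py | noOfWaysToMakeEvenByOneElementRemoval
-- ===== SOURCE A (Python) =====
-- def noOfWaysToMakeEvenByOneElementRemoval(array):
--
--
--
--
--
--     #even number of odd numbers - > sum is now odd, I can remove any even numner
--
--
--     #if i have odd no of odd nos --> sum is odd ---> i can remove any odd numver
--
--     oddCount=0
--     EvenCount=0
--
--     for num in array:
--         if num%2==0:
--             EvenCount+=1
--         else:
--             oddCount+=1
--
--     if oddCount%2==0: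
--         return EvenCount
--     else:
--         return oddCount
-- ===== SOURCE B (Python) =====
-- def noOfWaysToMakeEvenByOneElementRemoval(array):
--     total = sum(array)
--     return sum(1 for x in array if x % 2 == total % 2)
-- ===== Notes on version B (the rewrite author's own statement) =====
-- stated objective: simpler
-- what changed: B computes the total sum first and counts the elements whose parity matches the sum's parity in one comprehension, instead of maintaining separate odd/even counters and branching on the odd-count's parity afterwards.
import Mathlib
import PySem

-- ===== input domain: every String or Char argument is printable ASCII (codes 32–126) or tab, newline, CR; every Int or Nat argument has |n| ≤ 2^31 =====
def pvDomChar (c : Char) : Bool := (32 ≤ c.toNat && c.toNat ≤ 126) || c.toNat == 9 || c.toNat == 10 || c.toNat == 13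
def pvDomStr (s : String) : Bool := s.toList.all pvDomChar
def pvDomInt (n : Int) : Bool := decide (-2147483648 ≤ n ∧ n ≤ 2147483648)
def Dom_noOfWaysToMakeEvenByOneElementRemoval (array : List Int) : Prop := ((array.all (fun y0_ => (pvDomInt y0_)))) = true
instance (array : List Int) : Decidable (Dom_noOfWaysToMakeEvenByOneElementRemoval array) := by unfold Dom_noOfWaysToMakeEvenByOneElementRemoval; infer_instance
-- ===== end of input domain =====

-- B replaces A's two-parity-counter loop by "sum first, then count elements matching the sum's parity" (simpler decomposition, same O(n) cost).

-- ===== PORT A =====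
-- literal port of A: one pass keeping (oddCount, EvenCount), then branch on oddCount % 2
def noOfWaysToMakeEvenByOneElementRemoval (array : List Int) : Int :=
  let st := array.foldl
    (fun (st : Int × Int) num =>
      if PySem.Int.mod num 2 = 0 then (st.1, st.2 + 1) else (st.1 + 1, st.2))
    (0, 0)
  if PySem.Int.mod st.1 2 = 0 then st.2 else st.1

-- ===== PORT B =====
-- literal port of B: total = sum(array); sum(1 for x in array if x % 2 == total % 2)
def noOfWaysToMakeEvenByOneElementRemoval_alt (array : List Int) : Int :=
  let total := array.foldl (fun a x => a + x) 0
  array.foldl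
    (fun (acc : Int) x => if PySem.Int.mod x 2 = PySem.Int.mod total 2 then acc + 1 else acc)
    0

-- ===== PRECONDITION & SPEC =====
def Spec_noOfWaysToMakeEvenByOneElementRemoval (array : List Int) (out : Int) : Prop := out = noOfWaysToMakeEvenByOneElementRemoval_alt array
instance (array : List Int) (out : Int) : Decidable (Spec_noOfWaysToMakeEvenByOneElementRemoval array out) := by unfold Spec_noOfWaysToMakeEvenByOneElementRemoval; infer_instance

-- ===== CLAIM (what is proved, stated in full; the proofs are below) =====
def Claim_equal_noOfWaysToMakeEvenByOneElementRemoval : Prop := ∀ (array : List Int), Dom_noOfWaysToMakeEvenByOneElementRemoval array → Spec_noOfWaysToMakeEvenByOneElementRemoval array (noOfWaysToMakeEvenByOneElementRemoval array)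

-- ===== LEMMAS AND PROOFS =====

-- proof-only counts of odd / even elements
def pvOddC : List Int → Int
  | [] => 0
  | x :: l => (if x % 2 = 0 then 0 else 1) + pvOddC l

def pvEvenC : List Int → Int
  | [] => 0
  | x :: l => (if x % 2 = 0 then 1 else 0) + pvEvenC l

theorem pvMod2 (x : Int) : PySem.Int.mod x 2 = x % 2 :=
  PySem.Int.mod_eq_emod_of_pos (by norm_num)

theorem pvFoldA : ∀ (l : List Int) (o e : Int),
    l.foldl (fun (st : Int × Int) num =>
      if PySem.Int.mod num 2 = 0 then (st.1, st.2 + 1) else (st.1 + 1, st.2)) (o, e)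
    = (o + pvOddC l, e + pvEvenC l) := by
  intro l
  induction l with
  | nil => intro o e; simp [pvOddC, pvEvenC]
  | cons x l ih =>
      intro o e
      rw [List.foldl_cons, pvMod2 x]
      by_cases h : x % 2 = 0
      · rw [if_pos h, ih]
        simp only [pvOddC, pvEvenC, if_pos h, Prod.mk.injEq]
        constructor <;> ring
      · rw [if_neg h, ih]
        simp only [pvOddC, pvEvenC, if_neg h, Prod.mk.injEq]
        constructor <;> ring

theorem pvSumMod : ∀ (l : List Int) (s : Int),
    (l.foldl (fun a x => a + x) s) % 2 = (s + pvOddC l) % 2 := by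
  intro l
  induction l with
  | nil => intro s; simp [pvOddC]
  | cons x l ih =>
      intro s
      simp only [List.foldl_cons, ih, pvOddC]
      by_cases hx : x % 2 = 0
      · rw [if_pos hx]; omega
      · rw [if_neg hx]; omega

theorem pvCountB (t : Int) (ht : t = 0 ∨ t = 1) :
    ∀ (l : List Int) (acc : Int),
    l.foldl (fun (acc : Int) x => if PySem.Int.mod x 2 = t then acc + 1 else acc) acc
    = acc + (if t = 0 then pvEvenC l else pvOddC l) := by
  intro l
  induction l with
  | nil => intro acc; rcases ht with ht | ht <;> simp [ht, pvEvenC, pvOddC]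
  | cons x l ih =>
      intro acc
      rw [List.foldl_cons, pvMod2 x]
      rcases ht with ht | ht <;> subst ht <;> by_cases hx : x % 2 = 0
      · rw [if_pos hx, ih]
        simp only [pvEvenC, if_pos hx, if_pos (Eq.refl (0:Int)), ite_true]
        omega
      · rw [if_neg hx, ih]
        simp only [pvEvenC, if_neg hx, if_pos (Eq.refl (0:Int)), ite_true]
        omega
      · rw [if_neg (by omega : ¬ x % 2 = 1), ih]
        simp only [pvOddC, if_pos hx]
        norm_num
      · rw [if_pos (by omega : x % 2 = 1), ih]
        simp only [pvOddC, if_neg hx]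
        norm_num
        ring

-- ===== VERDICT (by name: the statement is the Claim_ definition above) =====
theorem noOfWaysToMakeEvenByOneElementRemoval_spec : Claim_equal_noOfWaysToMakeEvenByOneElementRemoval := by
  intro array _
  unfold Spec_noOfWaysToMakeEvenByOneElementRemoval
  unfold noOfWaysToMakeEvenByOneElementRemoval noOfWaysToMakeEvenByOneElementRemoval_alt
  simp only [pvFoldA]
  have hsum : (array.foldl (fun a x => a + x) 0) % 2 = pvOddC array % 2 := by
    simpa using pvSumMod array 0
  have ht : PySem.Int.mod (array.foldl (fun a x => a + x) 0) 2 = 0 ∨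
      PySem.Int.mod (array.foldl (fun a x => a + x) 0) 2 = 1 := by
    rw [pvMod2]; omega
  rw [pvCountB _ ht]
  rw [pvMod2, pvMod2]
  simp only [zero_add]
  rw [hsum]
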